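-- pv_equiv track=rewrite | github.com/yuweiiihuang/mahjong16 | bots/heuristics.py | counts34
-- ===== SOURCE A (Python) =====
-- from typing import Iterable, List, MutableSequence, Optional, Sequence, Tuple
--
-- Tile = int
--
-- Counts34 = List[int]
--
-- def counts34(tiles: Iterable[Tile]) -> Counts34:
--     """Map tiles into the standard 34-tile histogram."""
--
--     histogram = [0] * 34
--     for tile in tiles:
--         if 0 <= tile < 34:
--             histogram[tile] += 1
--         else:
--             return [0] * 34
--     return histogram
-- ===== SOURCE B (Python) =====
-- from typing import Iterable, List
--
-- Tile = int
-- Counts34 = List[int]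
--
-- def counts34(tiles: Iterable[Tile]) -> Counts34:
--     """Map tiles into the standard 34-tile histogram (sort, then merge-scan)."""
--     lst = sorted(tiles)
--     if lst and not (0 <= lst[0] and lst[-1] < 34):
--         return [0] * 34
--     out = []
--     i = 0
--     for v in range(34):
--         c = 0
--         while i < len(lst) and lst[i] == v:
--             c += 1
--             i += 1
--         out.append(c)
--     return out
-- ===== Notes on version B (the rewrite author's own statement) =====
-- stated objective: alternative
-- what changed: Replaces A's single-pass mutable-histogram loop with early return by a sort-then-merge-scan: sort the tiles, validate the whole range by looking only at the sorted list's min and max endpoints, then emit the 34 counts by walking the sorted list once with a cursor, run-length counting each value.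
import Mathlib
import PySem

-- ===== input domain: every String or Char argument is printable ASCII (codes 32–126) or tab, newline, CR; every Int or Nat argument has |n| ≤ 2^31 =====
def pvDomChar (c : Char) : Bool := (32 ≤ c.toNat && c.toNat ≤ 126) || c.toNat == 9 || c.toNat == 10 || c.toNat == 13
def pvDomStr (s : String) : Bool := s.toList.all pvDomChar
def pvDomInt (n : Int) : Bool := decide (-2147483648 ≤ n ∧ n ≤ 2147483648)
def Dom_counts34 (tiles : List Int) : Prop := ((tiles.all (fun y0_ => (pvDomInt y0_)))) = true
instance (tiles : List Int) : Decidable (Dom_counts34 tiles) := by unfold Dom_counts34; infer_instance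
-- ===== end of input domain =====

-- B replaces A's single-pass mutable-histogram loop (early return on bad tile) by a
-- sort-then-merge-scan: sort, validate via the sorted endpoints, then run-length count.


-- ===== PORT A =====
-- A's loop: mutate histogram in place, early-return zeros on an out-of-range tile.
def counts34Go (tiles : List Int) (hist : List Int) : List Int :=
  match tiles with
  | [] => hist
  | t :: ts =>
    if 0 ≤ t ∧ t < 34 then
      counts34Go ts (hist.set t.toNat (hist.getD t.toNat 0 + 1))
    else
      List.replicate 34 0

def counts34 (tiles : List Int) : List Int :=
  counts34Go tiles (List.replicate 34 0)

-- ===== PORT B =====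
-- B's inner while loop: advance cursor i past the run of value v, counting it.
def runGo (lst : List Int) (v : Int) (c : Nat) (i : Nat) : Nat × Nat :=
  if h : i < lst.length ∧ lst[i]? = some v then runGo lst v (c + 1) (i + 1) else (c, i)
termination_by lst.length - i
decreasing_by omega

-- B's outer for loop over range(34), threading the cursor and the output list.
def buildGo (lst : List Int) (vs : List Nat) (out : List Int) (i : Nat) : List Int :=
  match vs with
  | [] => out
  | v :: vs' =>
    let p := runGo lst (Int.ofNat v) 0 i
    buildGo lst vs' (out ++ [Int.ofNat p.1]) p.2

def counts34_alt (tiles : List Int) : List Int :=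
  let lst := PySem.List.sorted tiles (fun x => x) false
  if !lst.isEmpty && !(decide (0 ≤ lst.headD 0) && decide (lst.getLastD 0 < 34)) then
    List.replicate 34 0
  else
    buildGo lst (List.range 34) [] 0

-- ===== PRECONDITION & SPEC =====
def Spec_counts34 (tiles : List Int) (out : List Int) : Prop := out = counts34_alt tiles
instance (tiles : List Int) (out : List Int) : Decidable (Spec_counts34 tiles out) := by unfold Spec_counts34; infer_instance

-- ===== CLAIM (what is proved, stated in full; the proofs are below) =====
def Claim_equal_counts34 : Prop := ∀ (tiles : List Int), Dom_counts34 tiles → Spec_counts34 tiles (counts34 tiles)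

-- ===== LEMMAS AND PROOFS =====

-- A's loop computes, when all tiles are in range, the per-value counts.
theorem counts34Go_eq (ts : List Int) (h : List Int) (hl : h.length = 34) :
    counts34Go ts h =
      if ts.all (fun t => decide (0 ≤ t) && decide (t < 34)) then
        (List.range 34).map (fun i => h.getD i 0 + Int.ofNat (ts.count (Int.ofNat i)))
      else List.replicate 34 0 := by
  induction ts generalizing h with
  | nil =>
    simp only [counts34Go, List.all_nil, List.count_nil]
    refine List.ext_getElem (by simp [hl]) ?_
    intro i h1 h2
    simp [List.getD, h1]
  | cons t ts ih =>
    by_cases hr : 0 ≤ t ∧ t < 34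
    · have hlt : t.toNat < 34 := by omega
      have hcast : ((t.toNat : Nat) : Int) = t := by omega
      simp only [counts34Go, if_pos hr, List.all_cons]
      rw [ih _ (by simp [hl])]
      have hcond : (decide (0 ≤ t) && decide (t < 34)) = true := by
        simp [hr.1, hr.2]
      simp only [hcond, Bool.true_and]
      split
      · refine List.map_congr_left ?_
        intro i hi
        have hi34 : i < 34 := List.mem_range.mp hi
        by_cases he : i = t.toNat
        · subst he
          have : (h.set t.toNat (h.getD t.toNat 0 + 1)).getD t.toNat 0
              = h.getD t.toNat 0 + 1 := by
            simp [List.getD, hl, hlt]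
          rw [this]
          rw [List.count_cons]
          simp [hcast]
          ring
        · have : (h.set t.toNat (h.getD t.toNat 0 + 1)).getD i 0 = h.getD i 0 := by
            simp [List.getD, List.getElem?_set_ne (by omega : t.toNat ≠ i)]
          rw [this, List.count_cons]
          have hne : ¬ t = (i : Int) := by omega
          simp [Int.ofNat_eq_natCast, hne]
      · rfl
    · simp only [counts34Go, if_neg hr, List.all_cons]
      have : (decide (0 ≤ t) && decide (t < 34)) = false := by
        rcases not_and_or.mp hr with h1 | h1 <;> simp [h1]
      simp only [this, Bool.false_and]
      simp

-- B's while loop: on a sorted suffix whose elements are all ≥ v, it counts the v's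
-- and moves the cursor past them.
theorem runGo_spec (lst : List Int) (v : Int) (i c : Nat)
    (hp : (lst.drop i).Pairwise (· ≤ ·)) (hm : ∀ x ∈ lst.drop i, v ≤ x) :
    runGo lst v c i =
      (c + (lst.drop i).count v, i + ((lst.drop i).takeWhile (fun x => x == v)).length) := by
  have main : ∀ (n i c : Nat), lst.length - i ≤ n →
      (lst.drop i).Pairwise (· ≤ ·) → (∀ x ∈ lst.drop i, v ≤ x) →
      runGo lst v c i =
        (c + (lst.drop i).count v, i + ((lst.drop i).takeWhile (fun x => x == v)).length) := by
    intro n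
    induction n with
    | zero =>
      intro i c hn hp hm
      have hle : lst.length ≤ i := by omega
      have hdrop : lst.drop i = [] := List.drop_eq_nil_of_le hle
      rw [runGo, dif_neg (by omega)]
      simp [hdrop]
    | succ n ih =>
      intro i c hn hp hm
      by_cases h : i < lst.length ∧ lst[i]? = some v
      · have hiv : lst[i]'h.1 = v := by
          have := h.2; rw [List.getElem?_eq_getElem h.1] at this; injection this
        have hdrop : lst.drop i = v :: lst.drop (i + 1) := by
          rw [List.drop_eq_getElem_cons h.1, hiv]
        have hp' : (lst.drop (i + 1)).Pairwise (· ≤ ·) := by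
          rw [hdrop] at hp; exact hp.tail
        have hm' : ∀ x ∈ lst.drop (i + 1), v ≤ x := by
          intro x hx; exact hm x (by rw [hdrop]; exact List.mem_cons_of_mem _ hx)
        rw [runGo, dif_pos h, ih (i + 1) (c + 1) (by omega) hp' hm']
        rw [hdrop]
        simp only [List.count_cons, List.takeWhile_cons, beq_self_eq_true, if_true,
          List.length_cons]
        refine Prod.ext ?_ ?_ <;> simp <;> omega
      · rw [runGo, dif_neg h]
        rcases Nat.lt_or_ge i lst.length with hi | hi
        · have hx : lst[i]? = some (lst[i]'hi) := List.getElem?_eq_getElem hi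
          have hne : lst[i]'hi ≠ v := by
            intro he; exact h ⟨hi, by rw [hx, he]⟩
          have hdrop : lst.drop i = lst[i]'hi :: lst.drop (i + 1) :=
            List.drop_eq_getElem_cons hi
          have hgt : v < lst[i]'hi := by
            have := hm (lst[i]'hi) (by rw [hdrop]; exact List.mem_cons_self)
            omega
          have hnot : v ∉ lst.drop i := by
            rw [hdrop]
            intro hmem
            rcases List.mem_cons.mp hmem with he | hmem'
            · omega
            · have hle := (List.pairwise_cons.mp (hdrop ▸ hp)).1 v hmem'
              omega
          have hcnt : (lst.drop i).count v = 0 := List.count_eq_zero.mpr hnot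
          have htw : (lst.drop i).takeWhile (fun x => x == v) = [] := by
            rw [hdrop, List.takeWhile_cons, if_neg (by simp [hne])]
          simp [hcnt, htw]
        · have hdrop : lst.drop i = [] := List.drop_eq_nil_of_le hi
          simp [hdrop]
  exact main (lst.length - i) i c (le_refl _) hp hm

-- Every element of a ≤-sorted list is bounded by its last element.
theorem mem_le_getLastD (l : List Int) (hp : l.Pairwise (· ≤ ·)) :
    ∀ y ∈ l, y ≤ l.getLastD 0 := by
  induction l with
  | nil => simp
  | cons x xs ih =>
    intro y hy
    cases xs with
    | nil =>
      simp only [List.mem_singleton] at hy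
      subst hy
      simp [List.getLastD]
    | cons a t =>
      have hgl : (x :: a :: t).getLastD 0 = (a :: t).getLastD 0 := by
        simp [List.getLastD]
      rw [hgl]
      rcases List.mem_cons.mp hy with he | hy'
      · subst he
        have hmem : (a :: t).getLastD 0 ∈ a :: t := by
          have h1 := List.getLastD_mem_cons (l := t) (a := a)
          simpa [List.getLastD] using h1
        exact (List.pairwise_cons.mp hp).1 _ hmem
      · exact ih hp.tail y hy'

-- The head of dropWhile fails the predicate.
theorem dropWhile_head_not (p : Int → Bool) : ∀ (l : List Int) (h : Int) (rest : List Int),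
    l.dropWhile p = h :: rest → p h = false := by
  intro l
  induction l with
  | nil => intro h rest he; simp at he
  | cons a t ih =>
    intro h rest he
    rw [List.dropWhile_cons] at he
    by_cases hpa : p a = true
    · rw [if_pos hpa] at he; exact ih h rest he
    · rw [if_neg hpa] at he
      cases he
      simpa using hpa

-- B's outer loop on a sorted suffix with elements ≥ v appends the counts of v, v+1, ….
theorem buildGo_spec (lst : List Int) (k : Nat) : ∀ (v : Nat) (out : List Int) (i : Nat),
    (lst.drop i).Pairwise (· ≤ ·) → (∀ x ∈ lst.drop i, (v : Int) ≤ x) →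
    buildGo lst (List.range' v k) out i =
      out ++ (List.range' v k).map (fun u => Int.ofNat ((lst.drop i).count (Int.ofNat u))) := by
  induction k with
  | zero => intro v out i _ _; simp [buildGo]
  | succ k ih =>
    intro v out i hp hm
    rw [List.range'_succ]
    simp only [buildGo]
    rw [runGo_spec lst (Int.ofNat v) i 0 hp (by simp only [Int.ofNat_eq_natCast]; exact hm)]
    dsimp only
    have key : ∀ (p : Int → Bool) (l : List Int),
        l.drop ((l.takeWhile p).length) = l.dropWhile p := by
      intro p l
      have h2 := List.takeWhile_append_dropWhile (p := p) (l := l)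
      calc l.drop ((l.takeWhile p).length)
          = (l.takeWhile p ++ l.dropWhile p).drop ((l.takeWhile p).length) := by rw [h2]
        _ = l.dropWhile p := List.drop_left
    have hdj : lst.drop (i + ((lst.drop i).takeWhile (fun x => x == Int.ofNat v)).length)
        = (lst.drop i).dropWhile (fun x => x == Int.ofNat v) := by
      rw [← List.drop_drop]
      exact key _ _
    set dw := (lst.drop i).dropWhile (fun x => x == Int.ofNat v) with hdw
    have hpw : dw.Pairwise (· ≤ ·) := hp.sublist (List.dropWhile_sublist _)
    have hmw : ∀ x ∈ dw, ((v + 1 : Nat) : Int) ≤ x := by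
      cases hcase : dw with
      | nil => simp
      | cons h rest =>
        have hhd : h ∈ dw := by rw [hcase]; exact List.mem_cons_self
        have hhm : h ∈ lst.drop i := by
          rw [hdw] at hhd
          exact (List.dropWhile_sublist _).subset hhd
        have hh : (h == Int.ofNat v) = false :=
          dropWhile_head_not _ (lst.drop i) h rest (by rw [← hdw]; exact hcase)
        have hge : (v : Int) ≤ h := hm h hhm
        have hne : h ≠ (v : Int) := by simpa using hh
        have hgt : ((v + 1 : Nat) : Int) ≤ h := by push_cast; omega
        intro x hx
        rcases List.mem_cons.mp hx with he | hx'
        · subst he; exact hgt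
        · have hle : h ≤ x := (List.pairwise_cons.mp (hcase ▸ hpw)).1 x hx'
          omega
    have hp2 : (lst.drop (i + ((lst.drop i).takeWhile
        (fun x => x == Int.ofNat v)).length)).Pairwise (· ≤ ·) := by
      rw [hdj]; exact hpw
    have hm2 : ∀ x ∈ lst.drop (i + ((lst.drop i).takeWhile
        (fun x => x == Int.ofNat v)).length), ((v + 1 : Nat) : Int) ≤ x := by
      rw [hdj]; exact hmw
    rw [ih (v + 1) _ _ hp2 hm2, hdj]
    have hcnt : ∀ u ∈ List.range' (v + 1) k,
        dw.count (Int.ofNat u) = (lst.drop i).count (Int.ofNat u) := by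
      intro u hu
      have huv : v + 1 ≤ u := (List.mem_range'_1.mp hu).1
      conv_rhs => rw [← List.takeWhile_append_dropWhile
        (p := fun x => x == Int.ofNat v) (l := lst.drop i), List.count_append]
      have hz : ((lst.drop i).takeWhile (fun x => x == Int.ofNat v)).count (Int.ofNat u) = 0 := by
        refine List.count_eq_zero.mpr ?_
        intro hmem
        have hv := List.mem_takeWhile_imp hmem
        simp only [beq_iff_eq, Int.ofNat_eq_natCast] at hv
        omega
      rw [hz, ← hdw]
      omega
    have hmapeq : List.map (fun u => Int.ofNat (dw.count (Int.ofNat u))) (List.range' (v + 1) k)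
        = List.map (fun u => Int.ofNat ((lst.drop i).count (Int.ofNat u))) (List.range' (v + 1) k) :=
      List.map_congr_left (fun u hu => by rw [hcnt u hu])
    rw [hmapeq, List.map_cons]
    simp

-- ===== VERDICT (by name: the statement is the Claim_ definition above) =====
theorem counts34_spec : Claim_equal_counts34 := by
  intro tiles _
  unfold Spec_counts34 counts34 counts34_alt
  have hpair : (PySem.List.sorted tiles (fun x => x) false).Pairwise (· ≤ ·) := by
    have h := PySem.List.sorted_pairwise (xs := tiles) (key := fun x => x)
    simpa using h
  have hperm : (PySem.List.sorted tiles (fun x => x) false).Perm tiles :=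
    PySem.List.sorted_perm tiles (fun x => x) false
  by_cases hall : ∀ t ∈ tiles, 0 ≤ t ∧ t < 34
  · -- all tiles in range: both sides are the per-value counts
    rw [counts34Go_eq _ _ (by simp), if_pos (by
      simp only [List.all_eq_true]
      intro t ht
      have h1 := hall t ht
      simp [h1.1, h1.2])]
    have hcond : (!(PySem.List.sorted tiles (fun x => x) false).isEmpty &&
        !(decide (0 ≤ (PySem.List.sorted tiles (fun x => x) false).headD 0) &&
          decide ((PySem.List.sorted tiles (fun x => x) false).getLastD 0 < 34))) = false := by
      cases hSc : PySem.List.sorted tiles (fun x => x) false with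
      | nil => simp [hSc]
      | cons h tl =>
        have hh : h ∈ tiles := by
          rw [← PySem.List.mem_sorted (key := fun x => x) (rev := false)]
          rw [hSc]
          exact List.mem_cons_self
        have hlmem : (h :: tl).getLastD 0 ∈ h :: tl := by
          have h1 := List.getLastD_mem_cons (l := tl) (a := h)
          simpa [List.getLastD] using h1
        have hl : (h :: tl).getLastD 0 ∈ tiles := by
          rw [← PySem.List.mem_sorted (key := fun x => x) (rev := false), hSc]
          exact hlmem
        have h1 := hall _ hh
        have h2 := hall _ hl
        have h22 : ((h :: tl).getLast?).getD 0 < 34 := by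
          rw [← List.getLastD_eq_getLast?]; exact h2.2
        simp [hSc, h1.1, h22]
    rw [if_neg (by rw [hcond]; simp)]
    rw [List.range_eq_range']
    rw [buildGo_spec (PySem.List.sorted tiles (fun x => x) false) 34 0 [] 0
      (by simpa using hpair)
      (by
        intro x hx
        rw [List.drop_zero, PySem.List.mem_sorted] at hx
        simpa using (hall x hx).1)]
    rw [List.nil_append]
    refine List.map_congr_left ?_
    intro u hu
    have hu34 : u < 34 := (List.mem_range'_1.mp hu).2
    have hgd : (List.replicate 34 (0 : Int)).getD u 0 = 0 := by
      rw [List.getD_eq_getElem?_getD, List.getElem?_replicate]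
      simp [hu34]
    rw [hgd, List.drop_zero, List.Perm.count_eq hperm]
    simp
  · -- some tile out of range: both sides are the zero histogram
    have hex : ∃ t ∈ tiles, ¬(0 ≤ t ∧ t < 34) := by
      push_neg at hall
      obtain ⟨t, ht, hc⟩ := hall
      exact ⟨t, ht, by omega⟩
    obtain ⟨t, ht, hout⟩ := hex
    rw [counts34Go_eq _ _ (by simp), if_neg (by
      simp only [List.all_eq_true]
      push_neg
      exact ⟨t, ht, by rcases not_and_or.mp hout with h1 | h1 <;> simp [h1]⟩)]
    have htS : t ∈ PySem.List.sorted tiles (fun x => x) false := by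
      rw [PySem.List.mem_sorted]; exact ht
    cases hSc : PySem.List.sorted tiles (fun x => x) false with
    | nil => rw [hSc] at htS; simp at htS
    | cons h tl =>
      have hht : h ≤ t := by
        have h1 := PySem.List.key_head_sorted_le (xs := tiles) (key := fun x => x) hSc
        exact h1 t ht
      have htl : t ≤ (h :: tl).getLastD 0 := by
        have h1 := mem_le_getLastD (h :: tl) (hSc ▸ hpair)
        exact h1 t (hSc ▸ htS)
      have hcond : (!(h :: tl).isEmpty &&
          !(decide (0 ≤ (h :: tl).headD 0) && decide ((h :: tl).getLastD 0 < 34))) = true := by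
        rcases (by omega : t < 0 ∨ 34 ≤ t) with hc | hc
        · have hh0 : h < 0 := by omega
          simp
          omega
        · have h34 : ¬ ((h :: tl).getLastD 0 < 34) := by omega
          rw [List.getLastD_eq_getLast?] at h34
          simp
          omega
      show List.replicate 34 0 =
        if (!(h :: tl).isEmpty && !(decide (0 ≤ (h :: tl).headD 0) &&
            decide ((h :: tl).getLastD 0 < 34))) = true then List.replicate 34 0
        else buildGo (h :: tl) (List.range 34) [] 0
      rw [if_pos hcond]
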